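-- pv_equiv track=rewrite | github.com/quant1x/q1x-base | q1x/core/w1.py | find_monotonic_peaks_left
-- ===== SOURCE A (Python) =====
-- def find_monotonic_peaks_left(data_list):
--     """左侧单调上升波峰检测"""
--     if len(data_list) == 0:
--         return []
--
--     PL = []
--     Plast = data_list[0]
--     last_added = False
--
--     for i in range(1, len(data_list)):
--         current = data_list[i]
--         if current > Plast:
--             Plast = current
--             last_added = False
--         else:
--             if not last_added:
--                 PL.append(Plast)
--                 last_added = True
--
--     if not last_added:
--         if len(PL) == 0 or Plast > PL[-1]:
--             PL.append(Plast)
--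
--     return PL
-- ===== SOURCE B (Python) =====
-- def find_monotonic_peaks_left(data_list):
--     """Prefix-max table + run-length grouping instead of a stateful flag scan."""
--     if not data_list:
--         return []
--     # pass 1: prefix maxima
--     m = []
--     cur = data_list[0]
--     for x in data_list:
--         if x > cur:
--             cur = x
--         m.append(cur)
--     # pass 2: group equal runs; emit a run if length >= 2 or it is the final run
--     out = []
--     i, n = 0, len(m)
--     while i < n:
--         j = i
--         while j < n and m[j] == m[i]:
--             j += 1
--         if j - i >= 2 or j == n:
--             out.append(m[i])
--         i = j
--     return out
-- ===== Notes on version B (the rewrite author's own statement) =====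
-- stated objective: alternative
-- what changed: Replaces A's single stateful scan with a last_added flag by a two-phase decomposition: build the prefix-maximum table, then run-length-group it and emit a run's value when the run has length >= 2 or is the final run.
import Mathlib
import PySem

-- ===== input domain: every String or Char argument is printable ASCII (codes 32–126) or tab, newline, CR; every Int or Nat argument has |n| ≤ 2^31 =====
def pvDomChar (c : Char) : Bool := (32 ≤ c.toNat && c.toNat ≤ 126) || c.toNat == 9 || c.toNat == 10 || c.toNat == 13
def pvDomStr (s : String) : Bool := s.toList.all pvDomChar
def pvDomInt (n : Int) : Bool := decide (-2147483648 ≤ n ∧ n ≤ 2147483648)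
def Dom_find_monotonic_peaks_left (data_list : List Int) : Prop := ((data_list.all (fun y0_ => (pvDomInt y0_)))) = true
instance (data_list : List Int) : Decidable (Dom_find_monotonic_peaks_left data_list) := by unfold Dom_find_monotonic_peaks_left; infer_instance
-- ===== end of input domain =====

-- B replaces A's stateful flag scan by prefix-max table + run-length grouping (same output, same cost).

-- ===== PORT A =====
-- the for-loop over data_list[1:] with state (PL, Plast, last_added)
def pvA_loop : List Int → List Int → Int → Bool → List Int × Int × Bool
  | [], PL, p, la => (PL, p, la)
  | c :: rest, PL, p, la =>
    if c > p then pvA_loop rest PL c false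
    else if la = false then pvA_loop rest (PL ++ [p]) p true
    else pvA_loop rest PL p la

-- the trailing 'if not last_added: if len(PL)==0 or Plast > PL[-1]: PL.append(Plast)'
def pvA_fin (PL : List Int) (p : Int) (la : Bool) : List Int :=
  if la = false then
    -- 'len(PL) == 0 or Plast > PL[-1]' with Python's short-circuit or
    if PL.length = 0 then PL ++ [p]
    else match PySem.List.pyGet? PL (-1) with
      | some q => if p > q then PL ++ [p] else PL
      | none => PL
  else PL

def find_monotonic_peaks_left (data_list : List Int) : List Int :=
  match data_list with
  | [] => []
  | x :: t =>
    let s := pvA_loop t [] x false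
    pvA_fin s.1 s.2.1 s.2.2

-- ===== PORT B =====
-- pass 1 body: cur := max cur x; m.append(cur)
def pvB_pm (p : Int) : List Int → List Int
  | [] => []
  | c :: rest =>
    let p' := if c > p then c else p
    p' :: pvB_pm p' rest

-- pass 2: the outer while-loop; the inner while (advance j over equal values) is the span
def pvB_group : List Int → List Int
  | [] => []
  | v :: rest =>
    let same := rest.takeWhile (· == v)
    let restAfter := rest.dropWhile (· == v)
    if same.length + 1 ≥ 2 ∨ restAfter = [] then v :: pvB_group restAfter
    else pvB_group restAfter
  termination_by l => l.length
  decreasing_by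
    all_goals exact Nat.lt_succ_of_le (List.length_dropWhile_le _ _)

def find_monotonic_peaks_left_alt (data_list : List Int) : List Int :=
  match data_list with
  | [] => []
  | x :: _ => pvB_group (pvB_pm x data_list)

-- ===== PRECONDITION & SPEC =====
def Spec_find_monotonic_peaks_left (data_list : List Int) (out : List Int) : Prop := out = find_monotonic_peaks_left_alt data_list
instance (data_list : List Int) (out : List Int) : Decidable (Spec_find_monotonic_peaks_left data_list out) := by unfold Spec_find_monotonic_peaks_left; infer_instance

-- ===== CLAIM (what is proved, stated in full; the proofs are below) =====
def Claim_equal_find_monotonic_peaks_left : Prop := ∀ (data_list : List Int), Dom_find_monotonic_peaks_left data_list → Spec_find_monotonic_peaks_left data_list (find_monotonic_peaks_left data_list)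

-- ===== LEMMAS AND PROOFS =====

-- common specification both ports are reduced to: peaks p la t = output given current
-- prefix max p, 'already emitted' flag la, and remaining elements t
def pvPeaks (p : Int) (la : Bool) : List Int → List Int
  | [] => if la then [] else [p]
  | c :: r => if c > p then pvPeaks c false r
              else if la then pvPeaks p true r
              else p :: pvPeaks p true r

theorem pvA_loop_eq (t : List Int) : ∀ (PL : List Int) (p : Int) (la : Bool),
    (la = false → ∀ q ∈ PL, q < p) → (∀ q ∈ PL, q ≤ p) →
    pvA_fin (pvA_loop t PL p la).1 (pvA_loop t PL p la).2.1 (pvA_loop t PL p la).2.2 = PL ++ pvPeaks p la t := by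
  induction t with
  | nil =>
    intro PL p la h1 _
    cases la with
    | true => simp [pvA_loop, pvA_fin, pvPeaks]
    | false =>
      simp only [pvA_loop, pvA_fin, pvPeaks, reduceIte]
      rcases PL.eq_nil_or_concat with h | ⟨ys, y, rfl⟩
      · simp [h]
      · have hy : y < p := h1 rfl y (by simp)
        rw [List.concat_eq_append, if_neg (by simp), PySem.List.pyGet?_neg_one_append_singleton]
        simp [hy]
  | cons c r ih =>
    intro PL p la h1 h2
    by_cases hc : c > p
    · have : ∀ q ∈ PL, q < c := by
        intro q hq; exact lt_of_le_of_lt (h2 q hq) hc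
      simp only [pvA_loop, if_pos hc, pvPeaks]
      exact ih PL c false (fun _ => this) (fun q hq => le_of_lt (this q hq))
    · cases la with
      | false =>
        simp only [pvA_loop, if_neg hc, pvPeaks, Bool.false_eq_true, if_false, reduceIte]
        rw [ih (PL ++ [p]) p true (by simp) (by intro q hq; rcases List.mem_append.mp hq with h | h
                                                · exact h2 q h
                                                · simp at h; omega)]
        simp
      | true =>
        simp only [pvA_loop, if_neg hc, pvPeaks, if_true]
        exact ih PL p true (by simp) h2

theorem pvB_eq (t : List Int) :
    (∀ p : Int, pvB_group (p :: pvB_pm p t) = pvPeaks p false t) ∧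
    (∀ p : Int, pvB_group ((pvB_pm p t).dropWhile (· == p)) = pvPeaks p true t) := by
  induction t with
  | nil =>
    constructor <;> intro p <;> simp [pvB_pm, pvB_group, pvPeaks]
  | cons c r ih =>
    constructor <;> intro p <;> by_cases hc : c > p
    · -- head run is just [p]: skipped
      have hne : (c == p) = false := by simp; omega
      simp only [pvB_pm, if_pos hc]
      rw [pvB_group]
      simp only [List.takeWhile_cons, List.dropWhile_cons, hne, Bool.false_eq_true, if_false,
        List.length_nil]
      rw [if_neg (by simp), ih.1 c]
      simp [pvPeaks, hc]
    · -- plateau: run length ≥ 2, emit p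
      simp only [pvB_pm, if_neg hc]
      rw [pvB_group]
      simp only [List.takeWhile_cons, List.dropWhile_cons, beq_self_eq_true, if_true,
        List.length_cons]
      rw [if_pos (by omega), ih.2 p]
      simp [pvPeaks, hc]
    · have hne : (c == p) = false := by simp; omega
      simp only [pvB_pm, if_pos hc, List.dropWhile_cons, hne, Bool.false_eq_true, if_false]
      rw [ih.1 c]
      simp [pvPeaks, hc]
    · simp only [pvB_pm, if_neg hc, List.dropWhile_cons, beq_self_eq_true, if_true]
      rw [ih.2 p]
      simp [pvPeaks, hc]

theorem pvB_pm_cons_self (x : Int) (t : List Int) : pvB_pm x (x :: t) = x :: pvB_pm x t := by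
  simp [pvB_pm]

-- ===== VERDICT (by name: the statement is the Claim_ definition above) =====
theorem find_monotonic_peaks_left_spec : Claim_equal_find_monotonic_peaks_left := by
  intro data_list _
  unfold Spec_find_monotonic_peaks_left
  cases data_list with
  | nil => rfl
  | cons x t =>
    show find_monotonic_peaks_left (x :: t) = find_monotonic_peaks_left_alt (x :: t)
    have hA := pvA_loop_eq t [] x false (by simp) (by simp)
    simp only [find_monotonic_peaks_left, find_monotonic_peaks_left_alt]
    rw [hA, pvB_pm_cons_self, (pvB_eq t).1 x]
    simp
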